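/- GENERATED by c/gen_decode.py: decode facts of the image, one per distinct instruction byte string. -/
import UserX.DecodeImage

#decode_all Vorbis.Dec
  "0f28e3"  -- movaps xmm4,xmm3
  "0f8482fcffff"  -- je 10f314
  "0f8525040000"  -- jne 114bad
  "0f8c45feffff"  -- jl 111098
  "0f8feb050000"  -- jg 11655f
  "0fb6e8"  -- movzx ebp,al
  "39d8"  -- cmp eax,ebx
  "410fb64710"  -- movzx eax,BYTE PTR [r15+0x10]
  "41803c2400"  -- cmp BYTE PTR [r12],0x0
  "41895e10"  -- mov DWORD PTR [r14+0x10],ebx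
  "418b8640080000"  -- mov eax,DWORD PTR [r14+0x840]
  "41c7867405000001000000"  -- mov DWORD PTR [r14+0x574],0x1
  "440fb6642418"  -- movzx r12d,BYTE PTR [rsp+0x18]
  "443a6310"  -- cmp r12b,BYTE PTR [rbx+0x10]
  "448975a4"  -- mov DWORD PTR [rbp-0x5c],r14d
  "448b3b"  -- mov r15d,DWORD PTR [rbx]
  "448bb42490000000"  -- mov r14d,DWORD PTR [rsp+0x90]
  "453b7e04"  -- cmp r15d,DWORD PTR [r14+0x4]
  "458b6d00"  -- mov r13d,DWORD PTR [r13+0x0]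
  "48039d30080000"  -- add rbx,QWORD PTR [rbp+0x830]
  "48639d48ffffff"  -- movsxd rbx,DWORD PTR [rbp-0xb8]
  "4883c310"  -- add rbx,0x10
  "48894c2410"  -- mov QWORD PTR [rsp+0x10],rcx
  "4889f9"  -- mov rcx,rdi
  "488b7c2420"  -- mov rdi,QWORD PTR [rsp+0x20]
  "488d4207"  -- lea rax,[rdx+0x7]
  "488d7bd0"  -- lea rdi,[rbx-0x30]
  "488dab20020000"  -- lea rbp,[rbx+0x220]
  "488dbcc388050000"  -- lea rdi,[rbx+rax*8+0x588]
  "48c1e503"  -- shl rbp,0x3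
  "49031e"  -- add rbx,QWORD PTR [r14]
  "4983c001"  -- add r8,0x1
  "498d1486"  -- lea rdx,[r14+rax*4]
  "498d7e1c"  -- lea rdi,[r14+0x1c]
  "49c7850800c00000000000"  -- mov QWORD PTR [r13+0xc00008],0x0
  "4b8d0436"  -- lea rax,[r14+r14*1]
  "4c63f2"  -- movsxd r14,edx
  "4c8b042530f01f00"  -- mov r8,QWORD PTR ds:0x1ff030
  "4c8d2cc2"  -- lea r13,[rdx+rax*8]
  "4d63e5"  -- movsxd r12,r13d
  "4d8db5ae000000"  -- lea r14,[r13+0xae]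
  "660f57052a460100"  -- xorpd xmm0,XMMWORD PTR [rip+0x1462a]
  "66410f7efe"  -- movd r14d,xmm7
  "7222"  -- jb 104ca7
  "7450"  -- je 108a86
  "7550"  -- jne 113394
  "7c02"  -- jl 116811
  "7e74"  -- jle 10d6e7
  "80bc2c4001000000"  -- cmp BYTE PTR [rsp+rbp*1+0x140],0x0
  "83c307"  -- add ebx,0x7
  "89442424"  -- mov DWORD PTR [rsp+0x24],eax
  "898be8060000"  -- mov DWORD PTR [rbx+0x6e8],ecx
  "8b442410"  -- mov eax,DWORD PTR [rsp+0x10]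
  "8b742430"  -- mov esi,DWORD PTR [rsp+0x30]
  "8d3400"  -- lea esi,[rax+rax*1]
  "be01000000"  -- mov esi,0x1
  "c684244001000001"  -- mov BYTE PTR [rsp+0x140],0x1
  "c7839800c000f3f3f3f3"  -- mov DWORD PTR [rbx+0xc00098],0xf3f3f3f3
  "e803b5feff"  -- call 100480
  "e80d6bffff"  -- call 100640
  "e817f8feff"  -- call 103d00
  "e820ffffff"  -- call 107500
  "e82ac3feff"  -- call 1003c0
  "e83370ffff"  -- call 10d1c0
  "e83eeefeff"  -- call 100300
  "e848c8ffff"  -- call 100720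
  "e853f1feff"  -- call 100560
  "e8609efeff"  -- call 100640
  "e86cb7feff"  -- call 100640
  "e877edfeff"  -- call 100720
  "e88346ffff"  -- call 1008e0
  "e88e5bffff"  -- call 100cc0
  "e8977dffff"  -- call 10d1c0
  "e8a166ffff"  -- call 100640
  "e8acb8feff"  -- call 100640
  "e8b5b5feff"  -- call 100640
  "e8bf97ffff"  -- call 10c780
  "e8c9b4feff"  -- call 100800
  "e8d49affff"  -- call 100640
  "e8df42ffff"  -- call 107f00
  "e8e7f7feff"  -- call 103d00
  "e8efabffff"  -- call 100640
  "e8fa66ffff"  -- call 100720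
  "e926ffffff"  -- jmp 1143ba
  "e96bf9ffff"  -- jmp 114788
  "e9c6000000"  -- jmp 108b5e
  "eb1a"  -- jmp 1044d3
  "eba9"  -- jmp 111bf8
  "f20f100d08e00100"  -- movsd xmm1,QWORD PTR [rip+0x1e008]
  "f20f591503db0100"  -- mulsd xmm2,QWORD PTR [rip+0x1db03]
  "f2480f2ac1"  -- cvtsi2sd xmm0,rcx
  "f30f105db0"  -- movss xmm3,DWORD PTR [rbp-0x50]
  "f30f112b"  -- movss DWORD PTR [rbx],xmm5
  "f30f115c2440"  -- movss DWORD PTR [rsp+0x40],xmm3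
  "f30f580b"  -- addss xmm1,DWORD PTR [rbx]
  "f30f594b04"  -- mulss xmm1,DWORD PTR [rbx+0x4]
  "f30f5cc8"  -- subss xmm1,xmm0
  "f3410f110c24"  -- movss DWORD PTR [r12],xmm1
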